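-- pv_equiv track=rewrite | github.com/mvanegas10/BioCicle | BackEnd/src/utils.py | check_minimum_ranks
-- ===== SOURCE A (Python) =====
-- MINIMUM_RANKS = ["PHYLUM","CLASS","ORDER","FAMILY","GENUS","SPECIES"]
--
-- def check_minimum_ranks(taxonomy):
--     for min_rank in MINIMUM_RANKS:
--         if not min_rank in taxonomy.keys():
--             possible_ranks = [rank for rank in taxonomy.keys()
--                 if min_rank in rank]
--
--             if len(possible_ranks) > 0:
--                 taxonomy[min_rank] = taxonomy[possible_ranks[0]]
--
--             else:
--                 taxonomy[min_rank] = "undefined"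
--
--     return taxonomy
-- ===== SOURCE B (Python) =====
-- MINIMUM_RANKS = ["PHYLUM","CLASS","ORDER","FAMILY","GENUS","SPECIES"]
--
-- def check_minimum_ranks(taxonomy):
--     original_keys = list(taxonomy.keys())
--     index = {}
--     for key in original_keys:
--         for rank in MINIMUM_RANKS:
--             if rank in key and rank not in index:
--                 index[rank] = key
--     for rank in MINIMUM_RANKS:
--         if rank not in taxonomy:
--             if rank in index:
--                 taxonomy[rank] = taxonomy[index[rank]]
--             else:
--                 taxonomy[rank] = "undefined"
--     return taxonomy
-- ===== Notes on version B (the rewrite author's own statement) =====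
-- stated objective: alternative
-- what changed: Replaces A's per-missing-rank scan over the live dict's keys with one index-building pass over a snapshot of the original keys (first matching key per rank) followed by a single fill pass; correct because no rank name is a substring of another, so keys inserted during filling can never match a later rank.
import Mathlib
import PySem

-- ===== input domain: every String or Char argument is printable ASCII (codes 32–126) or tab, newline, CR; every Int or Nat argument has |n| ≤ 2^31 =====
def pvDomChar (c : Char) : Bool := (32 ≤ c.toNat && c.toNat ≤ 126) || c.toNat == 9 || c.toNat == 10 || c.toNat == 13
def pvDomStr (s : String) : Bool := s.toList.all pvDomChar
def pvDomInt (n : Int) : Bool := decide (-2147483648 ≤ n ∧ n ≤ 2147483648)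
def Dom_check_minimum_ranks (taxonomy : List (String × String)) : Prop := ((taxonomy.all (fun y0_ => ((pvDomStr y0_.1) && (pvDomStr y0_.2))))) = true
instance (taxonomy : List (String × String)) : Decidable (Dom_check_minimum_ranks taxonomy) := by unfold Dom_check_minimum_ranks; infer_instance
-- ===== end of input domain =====

-- B replaces A's per-missing-rank scan over the live dict's keys by one index pass over a
-- snapshot of the original keys plus a fill pass (alternative decomposition, same cost).
-- Both Pythons mutate the argument dict in place and return it; the theorem is about the
-- returned value (the mutation performed is the same on both sides).

def MINIMUM_RANKS : List String := ["PHYLUM", "CLASS", "ORDER", "FAMILY", "GENUS", "SPECIES"]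

-- ===== PORT A =====
-- one iteration of A's 'for min_rank in MINIMUM_RANKS' loop
def pvStepA (t : PySem.Dict String String) (r : String) : PySem.Dict String String :=
  if r ∈ t.keys then t
  else
    match t.keys.filter (fun k => PySem.Str.isIn r k) with
    -- len(possible_ranks) > 0: taxonomy[min_rank] = taxonomy[possible_ranks[0]]
    -- (the key possible_ranks[0] is present, so Python's d[k] is exactly getD with any default)
    | k0 :: _ => t.insert r (t.getD k0 "")
    | [] => t.insert r "undefined"

def check_minimum_ranks (taxonomy : List (String × String)) : List (String × String) :=
  (MINIMUM_RANKS.foldl pvStepA (PySem.Dict.mk taxonomy)).items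

-- ===== PORT B =====
-- inner loop of B's index-building pass: record key k for every rank it contains, first key wins
def pvIdxStep (k : String) (m : PySem.Dict String String) (r : String) : PySem.Dict String String :=
  if PySem.Str.isIn r k && !(m.contains r) then m.insert r k else m

def pvIndexKey (m : PySem.Dict String String) (k : String) : PySem.Dict String String :=
  MINIMUM_RANKS.foldl (pvIdxStep k) m

-- one iteration of B's fill pass, consulting the prebuilt index
def pvStepB (idx : PySem.Dict String String) (t : PySem.Dict String String) (r : String) :
    PySem.Dict String String :=
  if r ∈ t.keys then t
  else
    match idx.get? r with
    | some k0 => t.insert r (t.getD k0 "")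
    | none => t.insert r "undefined"

def check_minimum_ranks_alt (taxonomy : List (String × String)) : List (String × String) :=
  let t0 := PySem.Dict.mk taxonomy
  let idx := t0.keys.foldl pvIndexKey PySem.Dict.empty
  (MINIMUM_RANKS.foldl (pvStepB idx) t0).items

-- ===== PRECONDITION & SPEC =====
def Spec_check_minimum_ranks (taxonomy : List (String × String)) (out : List (String × String)) : Prop := out = check_minimum_ranks_alt taxonomy
instance (taxonomy : List (String × String)) (out : List (String × String)) : Decidable (Spec_check_minimum_ranks taxonomy out) := by unfold Spec_check_minimum_ranks; infer_instance

-- ===== CLAIM (what is proved, stated in full; the proofs are below) =====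
def Claim_equal_check_minimum_ranks : Prop := ∀ (taxonomy : List (String × String)), Dom_check_minimum_ranks taxonomy → Spec_check_minimum_ranks taxonomy (check_minimum_ranks taxonomy)

-- ===== LEMMAS AND PROOFS =====

-- no rank name occurs as a substring of a different rank name
theorem pv_no_sub : ∀ r ∈ MINIMUM_RANKS, ∀ r' ∈ MINIMUM_RANKS, r ≠ r' →
    PySem.Str.isIn r r' = false := by decide

theorem pv_ranks_nodup : MINIMUM_RANKS.Nodup := by decide

-- index inner loop: ranks not in rs are untouched
theorem pv_inner_get?_not_mem (rs : List String) (m : PySem.Dict String String)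
    (k r : String) (h : r ∉ rs) :
    (rs.foldl (pvIdxStep k) m).get? r = m.get? r := by
  induction rs generalizing m with
  | nil => rfl
  | cons a rs ih =>
    have ha : r ≠ a := fun e => h (e ▸ List.mem_cons_self)
    rw [List.foldl_cons, ih _ (fun hm => h (List.mem_cons_of_mem _ hm))]
    unfold pvIdxStep
    split_ifs with hc
    · exact PySem.Dict.get?_insert_of_ne m k ha
    · rfl

-- index inner loop: effect on a rank r ∈ rs, rs without duplicates
theorem pv_inner_get?_mem (rs : List String) (m : PySem.Dict String String)
    (k r : String) (h : r ∈ rs) (hnd : rs.Nodup) :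
    (rs.foldl (pvIdxStep k) m).get? r
    = if PySem.Str.isIn r k && !(m.contains r) then some k else m.get? r := by
  induction rs generalizing m with
  | nil => cases h
  | cons a rs ih =>
    rw [List.foldl_cons]
    rcases List.mem_cons.mp h with rfl | hr
    · rw [pv_inner_get?_not_mem rs _ k r (List.Nodup.notMem hnd)]
      unfold pvIdxStep
      split_ifs with hc
      · exact PySem.Dict.get?_insert_self m r k
      · rfl
    · have ha : r ≠ a := fun e => (List.Nodup.notMem hnd) (e ▸ hr)
      rw [ih _ hr (List.Nodup.of_cons hnd)]
      by_cases hc : (PySem.Str.isIn a k && !(m.contains a)) = true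
      · have hstep : pvIdxStep k m a = m.insert a k := by unfold pvIdxStep; rw [if_pos hc]
        have h1 : (m.insert a k).contains r = m.contains r := by
          rw [PySem.Dict.contains_insert]
          have : (r == a) = false := by simp [ha]
          rw [this, Bool.false_or]
        have h2 : (m.insert a k).get? r = m.get? r :=
          PySem.Dict.get?_insert_of_ne m k ha
        rw [hstep, h1, h2]
      · have hstep : pvIdxStep k m a = m := by unfold pvIdxStep; rw [if_neg hc]
        rw [hstep]

-- pvIndexKey characterised on ranks
theorem pv_indexKey_get? (m : PySem.Dict String String) (k r : String)
    (hr : r ∈ MINIMUM_RANKS) :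
    (pvIndexKey m k).get? r
    = if PySem.Str.isIn r k && !(m.contains r) then some k else m.get? r :=
  pv_inner_get?_mem MINIMUM_RANKS m k r hr pv_ranks_nodup

-- the whole index pass: the index maps rank r to the FIRST key of ks containing r
theorem pv_idx_get? (ks : List String) (m : PySem.Dict String String) (r : String)
    (hr : r ∈ MINIMUM_RANKS) :
    (ks.foldl pvIndexKey m).get? r
    = (m.get? r).or ((ks.filter (fun k => PySem.Str.isIn r k)).head?) := by
  induction ks generalizing m with
  | nil => simp
  | cons k ks ih =>
    rw [List.foldl_cons, ih, pv_indexKey_get? m k r hr]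
    cases hc : m.contains r with
    | true =>
      have hs := PySem.Dict.contains_eq_isSome_get? m r
      rw [hc] at hs
      obtain ⟨v, hv⟩ := Option.isSome_iff_exists.mp hs.symm
      rw [hv]
      simp
    | false =>
      have hn : m.get? r = none := (PySem.Dict.get?_eq_none_iff_contains m r).mpr hc
      rw [hn]
      cases hi : PySem.Str.isIn r k with
      | true =>
        have hf : (k :: ks).filter (fun k => PySem.Str.isIn r k)
            = k :: ks.filter (fun k => PySem.Str.isIn r k) := by
          rw [List.filter_cons, if_pos (by simpa using hi)]
        rw [hf]
        simp
      | false =>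
        have hf : (k :: ks).filter (fun k => PySem.Str.isIn r k)
            = ks.filter (fun k => PySem.Str.isIn r k) := by
          rw [List.filter_cons, if_neg (by simpa using hi)]
        rw [hf]
        simp

-- main invariant: as long as the extra keys appended so far (all of them rank names not in rs)
-- match no rank of rs, one A-step equals one B-step and the invariant is preserved
theorem pv_main (idx : PySem.Dict String String) (ks0 : List String)
    (hidx : ∀ r ∈ MINIMUM_RANKS, idx.get? r = (ks0.filter (fun k => PySem.Str.isIn r k)).head?)
    (rs : List String) :
    ∀ (d : PySem.Dict String String) (ex : List String),
    (∀ r ∈ rs, r ∈ MINIMUM_RANKS) → rs.Nodup →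
    d.keys = ks0 ++ ex →
    (∀ r ∈ rs, ∀ k ∈ ex, PySem.Str.isIn r k = false) →
    rs.foldl pvStepA d = rs.foldl (pvStepB idx) d := by
  induction rs with
  | nil => intro d ex _ _ _ _; rfl
  | cons r rs ih =>
    intro d ex hsub hnd hkeys hex
    have hrM : r ∈ MINIMUM_RANKS := hsub r List.mem_cons_self
    have hsub' : ∀ r' ∈ rs, r' ∈ MINIMUM_RANKS := fun r' h => hsub r' (List.mem_cons_of_mem _ h)
    have hex' : ∀ r' ∈ rs, ∀ k ∈ ex, PySem.Str.isIn r' k = false :=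
      fun r' h => hex r' (List.mem_cons_of_mem _ h)
    rw [List.foldl_cons, List.foldl_cons]
    by_cases hmem : r ∈ d.keys
    · have e1 : pvStepA d r = d := by unfold pvStepA; rw [if_pos hmem]
      have e2 : pvStepB idx d r = d := by unfold pvStepB; rw [if_pos hmem]
      rw [e1, e2]
      exact ih d ex hsub' (List.Nodup.of_cons hnd) hkeys hex'
    · -- r is missing: the extra keys match no rank, so A's scan sees exactly ks0's matches
      have hexf : ex.filter (fun k => PySem.Str.isIn r k) = [] :=
        List.filter_eq_nil_iff.mpr
          (fun k hk => by simpa using hex r List.mem_cons_self k hk)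
      have hfilter : d.keys.filter (fun k => PySem.Str.isIn r k)
          = ks0.filter (fun k => PySem.Str.isIn r k) := by
        rw [hkeys, List.filter_append, hexf, List.append_nil]
      have hcont : d.contains r = false := by
        cases hc : d.contains r with
        | false => rfl
        | true => exact absurd ((PySem.Dict.contains_iff_mem_keys d r).mp hc) hmem
      have hkeys' : ∀ v, (d.insert r v).keys = ks0 ++ (ex ++ [r]) := by
        intro v
        rw [PySem.Dict.keys_insert_of_not_contains d v hcont, hkeys, List.append_assoc]
      have hexnew : ∀ r' ∈ rs, ∀ k ∈ ex ++ [r], PySem.Str.isIn r' k = false := by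
        intro r' hr' k hk
        rcases List.mem_append.mp hk with hk | hk
        · exact hex' r' hr' k hk
        · have hkr : k = r := List.mem_singleton.mp hk
          subst hkr
          exact pv_no_sub r' (hsub' r' hr') k hrM
            (fun e => (List.Nodup.notMem hnd) (e ▸ hr'))
      have hidxr := hidx r hrM
      cases hh : ks0.filter (fun k => PySem.Str.isIn r k) with
      | nil =>
        have e1 : pvStepA d r = d.insert r "undefined" := by
          unfold pvStepA
          rw [if_neg hmem, hfilter, hh]
        have e2 : pvStepB idx d r = d.insert r "undefined" := by
          unfold pvStepB
          rw [if_neg hmem, hidxr, hh, List.head?_nil]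
        rw [e1, e2]
        exact ih _ (ex ++ [r]) hsub' (List.Nodup.of_cons hnd) (hkeys' _) hexnew
      | cons k0 tl =>
        have e1 : pvStepA d r = d.insert r (d.getD k0 "") := by
          unfold pvStepA
          rw [if_neg hmem, hfilter, hh]
        have e2 : pvStepB idx d r = d.insert r (d.getD k0 "") := by
          unfold pvStepB
          rw [if_neg hmem, hidxr, hh, List.head?_cons]
        rw [e1, e2]
        exact ih _ (ex ++ [r]) hsub' (List.Nodup.of_cons hnd) (hkeys' _) hexnew

-- ===== VERDICT (by name: the statement is the Claim_ definition above) =====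
theorem check_minimum_ranks_spec : Claim_equal_check_minimum_ranks := by
  intro taxonomy _
  unfold Spec_check_minimum_ranks check_minimum_ranks check_minimum_ranks_alt
  show (MINIMUM_RANKS.foldl pvStepA (PySem.Dict.mk taxonomy)).items
      = (MINIMUM_RANKS.foldl
          (pvStepB ((PySem.Dict.mk taxonomy).keys.foldl pvIndexKey PySem.Dict.empty))
          (PySem.Dict.mk taxonomy)).items
  have hidx : ∀ r ∈ MINIMUM_RANKS,
      ((PySem.Dict.mk taxonomy).keys.foldl pvIndexKey PySem.Dict.empty).get? r
      = ((PySem.Dict.mk taxonomy).keys.filter (fun k => PySem.Str.isIn r k)).head? := by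
    intro r hr
    rw [pv_idx_get? _ _ _ hr, PySem.Dict.get?_empty, Option.none_or]
  rw [pv_main _ _ hidx MINIMUM_RANKS (PySem.Dict.mk taxonomy) []
    (fun r h => h) pv_ranks_nodup (by simp) (fun _ _ k hk => absurd hk List.not_mem_nil)]
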